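-- pv_equiv track=rewrite | github.com/shreya-212/Dsa | 04.Binary_search/BS-I/find_array_rotations.py | findKRotation
-- ===== SOURCE A (Python) =====
-- def findKRotation(nums):
--     low,high=0,len(nums)-1
--     while low<high:
--         mid=(low+high)//2
--         if nums[mid]>=nums[high]:
--             low=mid+1
--         else:
--             high=mid
--     return low
-- ===== SOURCE B (Python) =====
-- def findKRotation(nums):
--     # Divide and conquer on list slices: compare the middle element with the
--     # last element, then recurse into the half that contains the rotation
--     # point, accumulating the offset of the discarded prefix.
--     if len(nums) <= 1:
--         return 0
--     mid = (len(nums) - 1) // 2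
--     if nums[mid] >= nums[-1]:
--         return (mid + 1) + findKRotation(nums[mid + 1:])
--     else:
--         return findKRotation(nums[:mid + 1])
-- ===== Notes on version B (the rewrite author's own statement) =====
-- stated objective: alternative
-- what changed: Replaced the iterative two-pointer while loop over (low, high) indices with a self-recursive divide-and-conquer that slices the list and accumulates the offset of the discarded prefix.
import Mathlib
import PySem

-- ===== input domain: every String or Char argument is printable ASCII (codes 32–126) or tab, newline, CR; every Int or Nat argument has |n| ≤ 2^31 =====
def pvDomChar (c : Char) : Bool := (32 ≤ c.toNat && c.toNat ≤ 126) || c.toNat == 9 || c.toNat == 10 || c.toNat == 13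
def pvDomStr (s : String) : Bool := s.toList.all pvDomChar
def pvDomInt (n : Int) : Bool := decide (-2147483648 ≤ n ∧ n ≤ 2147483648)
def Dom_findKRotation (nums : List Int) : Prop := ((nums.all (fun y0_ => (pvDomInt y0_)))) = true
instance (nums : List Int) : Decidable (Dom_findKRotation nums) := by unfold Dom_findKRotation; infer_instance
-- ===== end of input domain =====

-- B replaces A's iterative two-pointer loop over (low, high) indices by a self-recursive
-- divide-and-conquer on list slices that accumulates the offset of the discarded prefix
-- (objective: alternative).

-- ===== PORT A =====
-- the while loop; when low < high the indices mid and high are always in range,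
-- so pyGetD is exact here (the default 0 is never read)
-- fuel = nums.length bounds the iteration count (the window shrinks every pass);
-- the fuel case 0 is never reached on the actual call
def findKRotationLoop (nums : List Int) (fuel : Nat) (low high : Int) : Int :=
  match fuel with
  | 0 => low
  | fuel + 1 =>
    if low < high then
      let mid := PySem.Int.floordiv (low + high) 2
      if PySem.List.pyGetD nums mid 0 ≥ PySem.List.pyGetD nums high 0 then
        findKRotationLoop nums fuel (mid + 1) high
      else
        findKRotationLoop nums fuel low mid
    else low

def findKRotation (nums : List Int) : Int :=
  findKRotationLoop nums nums.length 0 ((nums.length : Int) - 1)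

-- ===== PORT B =====
-- when length ≥ 2 the indices mid and -1 are always in range, so pyGetD is exact
-- fuel = nums.length bounds the recursion depth (each call drops at least one
-- element); the fuel case 0 is never reached on the actual call
def findKRotationAltGo (fuel : Nat) (nums : List Int) : Int :=
  match fuel with
  | 0 => 0
  | fuel + 1 =>
    if nums.length ≤ 1 then 0
    else
      let mid := PySem.Int.floordiv ((nums.length : Int) - 1) 2
      if PySem.List.pyGetD nums mid 0 ≥ PySem.List.pyGetD nums (-1) 0 then
        (mid + 1) + findKRotationAltGo fuel (PySem.List.slice nums (some (mid + 1)) none)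
      else
        findKRotationAltGo fuel (PySem.List.slice nums none (some (mid + 1)))

def findKRotation_alt (nums : List Int) : Int :=
  findKRotationAltGo nums.length nums

-- ===== PRECONDITION & SPEC =====
def Spec_findKRotation (nums : List Int) (out : Int) : Prop := out = findKRotation_alt nums
instance (nums : List Int) (out : Int) : Decidable (Spec_findKRotation nums out) := by unfold Spec_findKRotation; infer_instance

-- ===== CLAIM (what is proved, stated in full; the proofs are below) =====
def Claim_equal_findKRotation : Prop := ∀ (nums : List Int), Dom_findKRotation nums → Spec_findKRotation nums (findKRotation nums)

-- ===== LEMMAS AND PROOFS =====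

-- A's loop on the window [low, high] equals low plus B's recursion on the slice nums[low:high+1]
lemma findKRotation_key (fuel : Nat) : ∀ (nums : List Int) (low high : Int),
    (high - low).toNat ≤ fuel → 0 ≤ low → low ≤ high + 1 → high < nums.length →
    findKRotationLoop nums fuel low high
      = low + findKRotationAltGo fuel (PySem.List.slice nums (some low) (some (high + 1))) := by
  induction fuel with
  | zero =>
    intro nums low high hn h0 h1 h2
    simp only [findKRotationLoop, findKRotationAltGo]
    omega
  | succ fuel ih =>
    intro nums low high hn h0 h1 h2
    have hsl : PySem.List.slice nums (some low) (some (high + 1))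
        = (nums.drop low.toNat).take ((high + 1).toNat - low.toNat) :=
      PySem.List.slice_toNat nums (by omega) (by omega)
    have hlen : (PySem.List.slice nums (some low) (some (high + 1))).length
        = ((high + 1).toNat - low.toNat) ⊓ (nums.length - low.toNat) := by
      rw [hsl]; simp [List.length_take, List.length_drop]
    rw [show findKRotationLoop nums (fuel + 1) low high
          = if low < high then
              let mid := PySem.Int.floordiv (low + high) 2
              if PySem.List.pyGetD nums mid 0 ≥ PySem.List.pyGetD nums high 0 then
                findKRotationLoop nums fuel (mid + 1) high
              else
                findKRotationLoop nums fuel low mid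
            else low
          from rfl]
    by_cases hlt : low < high
    · rw [if_pos hlt]
      set sub := PySem.List.slice nums (some low) (some (high + 1)) with hsub
      have hL : (sub.length : Int) = high + 1 - low := by rw [hlen]; omega
      have hmb : low ≤ (low + high) / 2 ∧ (low + high) / 2 < high := by omega
      have hidx1 : PySem.List.pyGetD sub ((low + high) / 2 - low) 0
          = PySem.List.pyGetD nums ((low + high) / 2) 0 := by
        rw [hsl,
            PySem.List.pyGetD_eq_getElem
              (xs := (nums.drop low.toNat).take ((high + 1).toNat - low.toNat))
              (i := (low + high) / 2 - low) 0 (by omega)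
              (by simp only [List.length_take, List.length_drop]; omega),
            PySem.List.pyGetD_eq_getElem (xs := nums) (i := (low + high) / 2) 0 (by omega)
              (by omega)]
        simp only [List.getElem_take, List.getElem_drop]
        congr 1
        omega
      have hidx2 : PySem.List.pyGetD sub (-1) 0 = PySem.List.pyGetD nums high 0 := by
        rw [hsl,
            PySem.List.pyGetD_neg_ofNat
              ((nums.drop low.toNat).take ((high + 1).toNat - low.toNat)) 1 0 (by norm_num)
              (by simp only [List.length_take, List.length_drop]; omega),
            PySem.List.pyGetD_eq_getElem (xs := nums) (i := high) 0 (by omega) (by omega)]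
        simp only [List.length_take, List.length_drop, List.getElem_take, List.getElem_drop]
        congr 1
        omega
      rw [show findKRotationAltGo (fuel + 1) sub
            = if sub.length ≤ 1 then 0
              else
                let mid := PySem.Int.floordiv ((sub.length : Int) - 1) 2
                if PySem.List.pyGetD sub mid 0 ≥ PySem.List.pyGetD sub (-1) 0 then
                  (mid + 1) + findKRotationAltGo fuel (PySem.List.slice sub (some (mid + 1)) none)
                else
                  findKRotationAltGo fuel (PySem.List.slice sub none (some (mid + 1)))
            from rfl]
      rw [if_neg (show ¬ sub.length ≤ 1 by omega)]
      simp only [PySem.Int.floordiv_eq_ediv_of_pos (show (0:Int) < 2 by norm_num)]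
      rw [show ((sub.length : Int) - 1) / 2 = (low + high) / 2 - low by omega]
      rw [hidx1, hidx2]
      by_cases hge : PySem.List.pyGetD nums ((low + high) / 2) 0
          ≥ PySem.List.pyGetD nums high 0
      · rw [if_pos hge, if_pos hge]
        have hslice : PySem.List.slice sub (some ((low + high) / 2 - low + 1))
            = PySem.List.slice nums (some ((low + high) / 2 + 1)) (some (high + 1)) := by
          rw [PySem.List.slice_from sub
                (show (0:Int) ≤ (low + high) / 2 - low + 1 by omega),
              PySem.List.slice_toNat nums (by omega) (by omega), hsl,
              List.drop_take, List.drop_drop]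
          congr 1
          · omega
          · congr 1
            omega
        rw [hslice,
            ih nums ((low + high) / 2 + 1) high (by omega) (by omega) (by omega) h2]
        ring
      · rw [if_neg hge, if_neg hge]
        have hslice : PySem.List.slice sub none (some ((low + high) / 2 - low + 1))
            = PySem.List.slice nums (some low) (some ((low + high) / 2 + 1)) := by
          rw [PySem.List.slice_to sub
                (show (0:Int) ≤ (low + high) / 2 - low + 1 by omega),
              PySem.List.slice_toNat nums (by omega) (by omega), hsl,
              List.take_take]
          congr 1
          omega
        rw [hslice,
            ih nums low ((low + high) / 2) (by omega) h0 (by omega) (by omega)]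
    · rw [if_neg hlt]
      rw [show findKRotationAltGo (fuel + 1) (PySem.List.slice nums (some low) (some (high + 1)))
            = if (PySem.List.slice nums (some low) (some (high + 1))).length ≤ 1 then 0
              else
                let mid := PySem.Int.floordiv
                  (((PySem.List.slice nums (some low) (some (high + 1))).length : Int) - 1) 2
                if PySem.List.pyGetD (PySem.List.slice nums (some low) (some (high + 1))) mid 0
                    ≥ PySem.List.pyGetD (PySem.List.slice nums (some low) (some (high + 1))) (-1) 0 then
                  (mid + 1) + findKRotationAltGo fuel
                    (PySem.List.slice (PySem.List.slice nums (some low) (some (high + 1))) (some (mid + 1)) none)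
                else
                  findKRotationAltGo fuel
                    (PySem.List.slice (PySem.List.slice nums (some low) (some (high + 1))) none (some (mid + 1)))
            from rfl,
          if_pos (show _ ≤ 1 by rw [hlen]; omega)]
      omega

theorem findKRotation_spec_aux (nums : List Int) :
    findKRotation nums = findKRotation_alt nums := by
  rw [findKRotation, findKRotation_alt,
      findKRotation_key nums.length nums 0 ((nums.length : Int) - 1)
        (by omega) (by omega) (by omega) (by omega)]
  rw [show (nums.length : Int) - 1 + 1 = (nums.length : Int) by omega,
      PySem.List.slice_zero_start, PySem.List.slice_to_natCast, List.take_length]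
  omega

-- ===== VERDICT (by name: the statement is the Claim_ definition above) =====
theorem findKRotation_spec : Claim_equal_findKRotation := by
  intro nums _
  exact findKRotation_spec_aux nums
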